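-- pv_equiv track=rewrite | github.com/minji-gwak/algorithm_study | baekjoon/1759.py | checkPwd
-- ===== SOURCE A (Python) =====
-- def checkPwd(combi):
--     consonants, vowels = 0, 0
--     for s in combi:
--         if s in ['a', 'e', 'i', 'o', 'u']:
--             vowels += 1
--         else:
--             consonants += 1
--     if consonants >= 2 and vowels >= 1:
--         return True
--     else:
--         return False
-- ===== SOURCE B (Python) =====
-- def checkPwd(combi):
--     # Early-exit countdown: track the REMAINING requirements (2 consonants,
--     # 1 vowel) and stop scanning as soon as both reach zero.
--     need_c, need_v = 2, 1
--     i = 0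
--     while need_c or need_v:
--         if i == len(combi):
--             return False
--         if combi[i] in ('a', 'e', 'i', 'o', 'u'):
--             need_v = max(0, need_v - 1)
--         else:
--             need_c = max(0, need_c - 1)
--         i += 1
--     return True
-- ===== Notes on version B (the rewrite author's own statement) =====
-- stated objective: alternative
-- what changed: Replaces the full-scan two-up-counter loop with an early-exit countdown: it tracks the remaining requirements (2 consonants, 1 vowel), saturating at zero, and returns True as soon as both are met without scanning the rest of the list.
import Mathlib
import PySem

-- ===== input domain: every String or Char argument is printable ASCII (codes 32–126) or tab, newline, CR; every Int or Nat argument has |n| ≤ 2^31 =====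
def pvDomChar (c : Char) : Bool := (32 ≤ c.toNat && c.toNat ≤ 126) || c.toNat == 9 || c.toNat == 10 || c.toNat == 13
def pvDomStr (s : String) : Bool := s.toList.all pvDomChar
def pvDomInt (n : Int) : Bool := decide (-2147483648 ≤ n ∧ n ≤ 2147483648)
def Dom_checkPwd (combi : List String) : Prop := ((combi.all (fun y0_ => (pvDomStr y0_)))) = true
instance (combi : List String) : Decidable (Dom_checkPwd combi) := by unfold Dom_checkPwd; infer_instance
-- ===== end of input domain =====

-- B replaces the full-scan two-counter loop with an early-exit recursion on remaining requirements.

-- ===== PORT A =====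
-- two counters (consonants, vowels) updated over the whole list, then if/else return
def checkPwd (combi : List String) : Bool :=
  let st := combi.foldl
    (fun (cv : Int × Int) s =>
      if ["a", "e", "i", "o", "u"].contains s then (cv.1, cv.2 + 1)
      else (cv.1 + 1, cv.2)) (0, 0)
  if st.1 ≥ 2 ∧ st.2 ≥ 1 then true else false

-- ===== PORT B =====
-- recursion on the remaining list and the remaining requirements, returning true early
def checkPwdGo (rest : List String) (need_c need_v : Int) : Bool :=
  if need_c = 0 ∧ need_v = 0 then true
  else match rest with
    | [] => false
    | s :: rest' =>
      if ["a", "e", "i", "o", "u"].contains s then checkPwdGo rest' need_c (max 0 (need_v - 1))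
      else checkPwdGo rest' (max 0 (need_c - 1)) need_v

def checkPwd_alt (combi : List String) : Bool := checkPwdGo combi 2 1

-- ===== PRECONDITION & SPEC =====
def Spec_checkPwd (combi : List String) (out : Bool) : Prop := out = checkPwd_alt combi
instance (combi : List String) (out : Bool) : Decidable (Spec_checkPwd combi out) := by unfold Spec_checkPwd; infer_instance

-- ===== CLAIM (what is proved, stated in full; the proofs are below) =====
def Claim_equal_checkPwd : Prop := ∀ (combi : List String), Dom_checkPwd combi → Spec_checkPwd combi (checkPwd combi)

-- ===== LEMMAS AND PROOFS =====

-- the A-loop invariant: final state = accumulator + (non-vowel count, vowel count)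
theorem checkPwd_foldl_inv (combi : List String) (c v : Int) :
    combi.foldl
      (fun (cv : Int × Int) s =>
        if ["a", "e", "i", "o", "u"].contains s then (cv.1, cv.2 + 1)
        else (cv.1 + 1, cv.2)) (c, v)
    = (c + ((combi.countP (fun s => ¬ ["a", "e", "i", "o", "u"].contains s = true) : Nat) : Int),
       v + ((combi.countP (fun s => ["a", "e", "i", "o", "u"].contains s) : Nat) : Int)) := by
  induction combi generalizing c v with
  | nil => simp
  | cons hd tl ih =>
    rw [List.foldl_cons]
    by_cases h : ["a", "e", "i", "o", "u"].contains hd = true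
    · rw [if_pos h,
        List.countP_cons_of_pos (l := tl) (p := fun s => ["a", "e", "i", "o", "u"].contains s) (by simpa using h),
        List.countP_cons_of_neg (l := tl) (p := fun s => decide (¬ ["a", "e", "i", "o", "u"].contains s = true)) (by simp at h ⊢; tauto),
        ih]
      simp only [Prod.mk.injEq]
      constructor <;> push_cast <;> ring
    · rw [if_neg h,
        List.countP_cons_of_neg (l := tl) (p := fun s => ["a", "e", "i", "o", "u"].contains s) (by simpa using h),
        List.countP_cons_of_pos (l := tl) (p := fun s => decide (¬ ["a", "e", "i", "o", "u"].contains s = true)) (by simp at h ⊢; tauto),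
        ih]
      simp only [Prod.mk.injEq]
      constructor <;> push_cast <;> ring

-- the B-recursion characterisation: go answers "are there still ≥ need_c consonants and ≥ need_v vowels"
theorem checkPwdGo_eq (rest : List String) (nc nv : Int) (hc : 0 ≤ nc) (hv : 0 ≤ nv) :
    checkPwdGo rest nc nv
    = decide (((rest.countP (fun s => ¬ ["a", "e", "i", "o", "u"].contains s = true) : Nat) : Int) ≥ nc
        ∧ ((rest.countP (fun s => ["a", "e", "i", "o", "u"].contains s) : Nat) : Int) ≥ nv) := by
  induction rest generalizing nc nv with
  | nil =>
    rw [checkPwdGo]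
    by_cases h : nc = 0 ∧ nv = 0
    · simp [h]
    · simp only [h, if_false]
      simp only [List.countP_nil]
      rw [eq_comm, decide_eq_false_iff_not]
      omega
  | cons hd tl ih =>
    rw [checkPwdGo]
    by_cases h : nc = 0 ∧ nv = 0
    · rw [if_pos h]
      rw [eq_comm, decide_eq_true_iff]
      constructor <;> [skip; omega]
      omega
    · rw [if_neg h]
      by_cases hvow : ["a", "e", "i", "o", "u"].contains hd = true
      · rw [if_pos hvow, ih _ _ hc (by omega),
          List.countP_cons_of_pos (l := tl) (p := fun s => ["a", "e", "i", "o", "u"].contains s) (by simpa using hvow),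
          List.countP_cons_of_neg (l := tl) (p := fun s => decide (¬ ["a", "e", "i", "o", "u"].contains s = true)) (by simp at hvow ⊢; tauto)]
        rw [decide_eq_decide]
        push_cast
        omega
      · rw [if_neg hvow, ih _ _ (by omega) hv,
          List.countP_cons_of_neg (l := tl) (p := fun s => ["a", "e", "i", "o", "u"].contains s) (by simpa using hvow),
          List.countP_cons_of_pos (l := tl) (p := fun s => decide (¬ ["a", "e", "i", "o", "u"].contains s = true)) (by simp at hvow ⊢; tauto)]
        rw [decide_eq_decide]
        push_cast
        omega

-- ===== VERDICT (by name: the statement is the Claim_ definition above) =====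
theorem checkPwd_spec : Claim_equal_checkPwd := by
  intro combi _
  unfold Spec_checkPwd checkPwd checkPwd_alt
  rw [checkPwd_foldl_inv, checkPwdGo_eq combi 2 1 (by omega) (by omega)]
  by_cases h : ((combi.countP (fun s => ¬ ["a", "e", "i", "o", "u"].contains s = true) : Nat) : Int) ≥ 2
      ∧ ((combi.countP (fun s => ["a", "e", "i", "o", "u"].contains s) : Nat) : Int) ≥ 1 <;>
    simp
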